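-- pv_equiv track=rewrite | github.com/lmolino03/simplimed | utils/utils.py | remove_after_page
-- ===== SOURCE A (Python) =====
-- def remove_after_page(text):
--     lines = text.split('\n')
--     filtered_lines = []
--     for line in lines:
--         if 'Page' in line:
--             line = line.split('Page')[0]
--         filtered_lines.append(line)
--     modified_text = '\n'.join(filtered_lines)
--     return modified_text
-- ===== SOURCE B (Python) =====
-- def remove_after_page(text):
--     # Single left-to-right character scan: copy characters until a 'Page'
--     # match begins, then jump straight to the next newline (dropping the rest
--     # of that line); no split/join, no per-line list.
--     out = []
--     i = 0
--     n = len(text)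
--     while i < n:
--         if text.startswith('Page', i):
--             j = text.find('\n', i)
--             if j == -1:
--                 break
--             i = j
--         else:
--             out.append(text[i])
--             i += 1
--     return ''.join(out)
-- ===== Notes on version B (the rewrite author's own statement) =====
-- stated objective: alternative
-- what changed: Replaced split-into-lines / per-line truncate-at-'Page' / rejoin with a single left-to-right character scan that copies characters and, on seeing a 'Page' match, jumps directly to the next newline.
import Mathlib
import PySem

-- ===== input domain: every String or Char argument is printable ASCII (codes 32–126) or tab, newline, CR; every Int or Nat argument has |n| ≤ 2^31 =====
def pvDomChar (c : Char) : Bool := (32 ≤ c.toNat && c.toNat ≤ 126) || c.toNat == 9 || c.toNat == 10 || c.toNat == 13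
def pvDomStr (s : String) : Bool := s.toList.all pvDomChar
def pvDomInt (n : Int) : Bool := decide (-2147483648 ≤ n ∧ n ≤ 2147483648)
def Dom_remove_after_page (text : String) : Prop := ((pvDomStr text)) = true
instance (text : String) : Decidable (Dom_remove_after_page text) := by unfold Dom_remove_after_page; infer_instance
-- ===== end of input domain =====

-- B replaces A's split-lines / truncate-each-line-at-'Page' / rejoin with a single
-- character scan that jumps to the next newline when a 'Page' match starts (alternative
-- decomposition, same cost). Equivalence is about the return value; neither mutates.

-- ===== PORT A =====
-- A, transliterated on the character-list side (PySem.Chars primitives are the exact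
-- Python semantics of split/in/join); text.split('Page')[0] is headD since a
-- non-empty-separator split is never the empty list, so Python's [0] never raises.
def remove_after_page (text : String) : String :=
  let lines := PySem.Chars.splitOn text.toList ['\n']
  let filtered_lines := lines.foldl (fun acc line =>
    acc ++ [if PySem.Chars.isIn ['P','a','g','e'] line then
        (PySem.Chars.splitOn line ['P','a','g','e']).headD []
      else line]) []
  String.ofList (PySem.Chars.join ['\n'] filtered_lines)

-- ===== PORT B =====
-- Source B's scan: copy chars one by one; when 'Page' starts here, drop up to the next
-- newline (text.find('\n', i); dropping everything when there is none = the break).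
def altGo : List Char → List Char
  | [] => []
  | c :: rest =>
    if ['P','a','g','e'].isPrefixOf (c :: rest) then
      altGo (rest.dropWhile (· ≠ '\n'))
    else c :: altGo rest
termination_by l => l.length
decreasing_by
  · exact Nat.lt_succ_of_le (List.length_dropWhile_le _ _)
  · simp

def remove_after_page_alt (text : String) : String :=
  String.ofList (altGo text.toList)

-- ===== PRECONDITION & SPEC =====
def Spec_remove_after_page (text : String) (out : String) : Prop := out = remove_after_page_alt text
instance (text : String) (out : String) : Decidable (Spec_remove_after_page text out) := by unfold Spec_remove_after_page; infer_instance

-- ===== CLAIM (what is proved, stated in full; the proofs are below) =====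
def Claim_equal_remove_after_page : Prop := ∀ (text : String), Dom_remove_after_page text → Spec_remove_after_page text (remove_after_page text)

-- ===== LEMMAS AND PROOFS =====

def splitRec (c0 : Char) (sep0 : List Char) : List Char → List (List Char)
  | [] => [[]]
  | c :: rest =>
    if (c0 :: sep0).isPrefixOf (c :: rest) then
      [] :: splitRec c0 sep0 (rest.drop sep0.length)
    else
      match splitRec c0 sep0 rest with
      | [] => [[c]]
      | h :: t => (c :: h) :: t
termination_by l => l.length
decreasing_by
  · simp [List.length_drop]
  · simp

theorem splitRec_ne_nil (c0 : Char) (sep0 : List Char) (l : List Char) :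
    splitRec c0 sep0 l ≠ [] := by
  fun_induction splitRec <;> simp_all

theorem modifyHead_id' {α : Type} (L : List α) : L.modifyHead (fun x => x) = L := by
  cases L <;> simp

theorem go_spec (c0 : Char) (sep0 : List Char) (fuel : Nat) (l cur : List Char) (acc : List (List Char))
    (h : l.length < fuel) :
    PySem.Chars.splitOn.go (c0 :: sep0) fuel l cur acc =
      acc.reverse ++ ((splitRec c0 sep0 l).modifyHead (cur.reverse ++ ·)) := by
  induction fuel generalizing l cur acc with
  | zero => omega
  | succ fuel ih =>
    cases l with
    | nil => simp [PySem.Chars.splitOn.go, splitRec]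
    | cons c rest =>
      simp only [List.length_cons] at h
      rw [PySem.Chars.splitOn.go]
      by_cases hp : (c0 :: sep0).isPrefixOf (c :: rest) = true
      · simp only [hp, if_true]
        conv_rhs => rw [splitRec]
        rw [show (c :: rest).drop (c0 :: sep0).length = rest.drop sep0.length from rfl]
        rw [ih _ _ _ (by simp only [List.length_drop]; omega)]
        simp [hp, modifyHead_id']
      · simp only [hp]
        conv_rhs => rw [splitRec]
        have hrw := ih rest (c :: cur) acc (by omega)
        rw [hrw]
        simp only [hp]
        rcases hsr : splitRec c0 sep0 rest with _ | ⟨hh, tt⟩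
        · exact absurd hsr (splitRec_ne_nil _ _ _)
        · simp

theorem splitOn_eq_splitRec (c0 : Char) (sep0 : List Char) (l : List Char) :
    PySem.Chars.splitOn l (c0 :: sep0) = splitRec c0 sep0 l := by
  rw [PySem.Chars.splitOn, go_spec _ _ _ _ _ _ (by omega)]
  simp [modifyHead_id']

def trunc : List Char → List Char
  | [] => []
  | c :: rest =>
    if ['P','a','g','e'].isPrefixOf (c :: rest) then []
    else c :: trunc rest

theorem headD_splitRec (l : List Char) :
    (splitRec 'P' ['a','g','e'] l).headD [] = trunc l := by
  fun_induction trunc with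
  | case1 => simp [splitRec]
  | case2 c rest hp => rw [splitRec]; simp [hp]
  | case3 c rest hp ih =>
    rw [splitRec]
    simp only [hp]
    rcases hsr : splitRec 'P' ['a','g','e'] rest with _ | ⟨h, t⟩
    · exact absurd hsr (splitRec_ne_nil _ _ _)
    · simp [hsr] at ih ⊢; exact ih

theorem trunc_of_not_infix (l : List Char) (h : ¬ (['P','a','g','e'] <:+: l)) :
    trunc l = l := by
  induction l with
  | nil => simp [trunc]
  | cons c rest ih =>
    have hp : ¬ (['P','a','g','e'].isPrefixOf (c :: rest) = true) := by
      intro hpre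
      exact h ((List.isPrefixOf_iff_prefix.mp hpre).isInfix)
    rw [trunc, if_neg hp, ih (fun hin => h (hin.trans (List.suffix_cons c rest).isInfix))]

theorem nf_splitRec (c0 : Char) (l : List Char) :
    ∀ m ∈ splitRec c0 [] l, c0 ∉ m := by
  fun_induction splitRec c0 [] l with
  | case1 => simp
  | case2 c rest hp ih =>
    intro m hm
    simp only [List.mem_cons] at hm
    rcases hm with hm | hm
    · simp [hm]
    · exact ih m hm
  | case3 c rest hp hsr => exact absurd hsr (splitRec_ne_nil _ _ _)
  | case4 c rest hp h t hsr ih =>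
    have hc : c ≠ c0 := by
      intro hc; apply hp; simp [hc, List.isPrefixOf]
    intro m hm
    simp only [List.mem_cons] at hm
    rcases hm with hm | hm
    · subst hm
      have hh : c0 ∉ h := ih h (by rw [hsr]; exact List.mem_cons_self ..)
      simp [hc.symm, hh]
    · exact ih m (by rw [hsr]; exact List.mem_cons_of_mem _ hm)

theorem join_cons_head (sep : List Char) (c : Char) (h : List Char) (t : List (List Char)) :
    PySem.Chars.join sep ((c :: h) :: t) = c :: PySem.Chars.join sep (h :: t) := by
  cases t with
  | nil => rw [PySem.Chars.join_singleton, PySem.Chars.join_singleton]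
  | cons q qs => rw [PySem.Chars.join_cons_cons, PySem.Chars.join_cons_cons]; simp

theorem join_splitRec (c0 : Char) (sep0 : List Char) (l : List Char) :
    PySem.Chars.join (c0 :: sep0) (splitRec c0 sep0 l) = l := by
  fun_induction splitRec c0 sep0 l with
  | case1 => rw [PySem.Chars.join_singleton]
  | case2 c rest hp ih =>
    have hne := splitRec_ne_nil c0 sep0 (rest.drop sep0.length)
    rcases hsr : splitRec c0 sep0 (rest.drop sep0.length) with _ | ⟨h, t⟩
    · exact absurd hsr hne
    · rw [hsr] at ih
      rw [PySem.Chars.join_cons_cons, ih]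
      have hpre := List.isPrefixOf_iff_prefix.mp hp
      rcases hpre with ⟨tl, htl⟩
      have : tl = rest.drop sep0.length := by
        have := congrArg (List.drop (c0 :: sep0).length) htl
        simpa using this
      subst this
      simpa using htl
  | case3 c rest hp hsr => exact absurd hsr (splitRec_ne_nil _ _ _)
  | case4 c rest hp h t hsr ih =>
    rw [hsr] at ih
    rw [join_cons_head, ih]

theorem page_prefix_drop (p y : List Char) (hnf : '\n' ∉ p)
    (h : ['P','a','g','e'].isPrefixOf (p ++ '\n' :: y) = true) :
    ['P','a','g','e'].isPrefixOf p = true := by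
  have hpre := List.isPrefixOf_iff_prefix.mp h
  by_cases hlen : 4 ≤ p.length
  · exact List.isPrefixOf_iff_prefix.mpr
      (List.prefix_of_prefix_length_le hpre (List.prefix_append p _) (by simpa using hlen))
  · exfalso
    have heq := List.prefix_iff_eq_take.mp hpre
    have hmem : '\n' ∈ (['P','a','g','e'] : List Char) := by
      rw [heq, show ((['P','a','g','e'] : List Char).length) = 4 from rfl, List.take_append]
      refine List.mem_append_right _ ?_
      rw [show (4 : Nat) - p.length = (3 - p.length) + 1 by omega, List.take_succ_cons]
      exact List.mem_cons_self ..
    simp at hmem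

theorem altGo_nf (p : List Char) (hnf : '\n' ∉ p) : altGo p = trunc p := by
  fun_induction altGo p with
  | case1 => simp [trunc]
  | case2 c rest hp ih =>
    rw [trunc, if_pos hp]
    have : rest.dropWhile (· ≠ '\n') = [] := by
      rw [List.dropWhile_eq_nil_iff]
      intro x hx
      simp only [ne_eq, decide_eq_true_eq]
      intro hxe; subst hxe
      exact hnf (List.mem_cons_of_mem _ hx)
    rw [this, altGo]
  | case3 c rest hp ih =>
    rw [trunc, if_neg hp, ih (fun hm => hnf (List.mem_cons_of_mem _ hm))]

theorem altGo_append (p y : List Char) (hnf : '\n' ∉ p) :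
    altGo (p ++ '\n' :: y) = trunc p ++ '\n' :: altGo y := by
  induction p with
  | nil =>
    rw [List.nil_append, altGo, if_neg (by simp [List.isPrefixOf])]
    simp [trunc]
  | cons c rest ih =>
    rw [List.cons_append]
    by_cases hp : (['P','a','g','e'].isPrefixOf (c :: (rest ++ '\n' :: y))) = true
    · rw [altGo, if_pos hp]
      have hp' : ['P','a','g','e'].isPrefixOf (c :: rest) = true :=
        page_prefix_drop (c :: rest) y hnf (by simpa using hp)
      have hd : (rest ++ '\n' :: y).dropWhile (· ≠ '\n') = '\n' :: y := by
        rw [List.dropWhile_append]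
        have : rest.dropWhile (· ≠ '\n') = [] := by
          rw [List.dropWhile_eq_nil_iff]
          intro x hx
          simp only [ne_eq, decide_eq_true_eq]
          intro hxe; subst hxe
          exact hnf (List.mem_cons_of_mem _ hx)
        rw [this]
        simp [List.dropWhile]
      rw [hd, trunc, if_pos hp', altGo, if_neg (by simp [List.isPrefixOf])]
      rfl
    · have hp' : ¬ (['P','a','g','e'].isPrefixOf (c :: rest) = true) := by
        intro hpp
        apply hp
        apply List.isPrefixOf_iff_prefix.mpr
        exact (List.isPrefixOf_iff_prefix.mp hpp).trans (by rw [← List.cons_append]; exact List.prefix_append _ _)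
      rw [altGo, if_neg hp, trunc, if_neg hp',
        ih (fun hm => hnf (List.mem_cons_of_mem _ hm))]
      rfl

theorem altGo_join (parts : List (List Char)) (hnf : ∀ m ∈ parts, '\n' ∉ m) :
    altGo (PySem.Chars.join ['\n'] parts) = PySem.Chars.join ['\n'] (parts.map trunc) := by
  induction parts with
  | nil => rw [List.map_nil, PySem.Chars.join_nil, altGo]
  | cons p ps ih =>
    cases ps with
    | nil =>
      rw [List.map_cons, List.map_nil, PySem.Chars.join_singleton, PySem.Chars.join_singleton]
      exact altGo_nf p (hnf p (List.mem_cons_self ..))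
    | cons q qs =>
      rw [PySem.Chars.join_cons_cons, List.map_cons, List.map_cons, PySem.Chars.join_cons_cons (p := trunc p)]
      have hj : p ++ ['\n'] ++ PySem.Chars.join ['\n'] (q :: qs)
          = p ++ '\n' :: PySem.Chars.join ['\n'] (q :: qs) := by simp
      rw [hj, altGo_append p _ (hnf p (List.mem_cons_self ..)),
        ih (fun m hm => hnf m (List.mem_cons_of_mem _ hm))]
      simp [List.map_cons]

theorem line_eq_trunc (line : List Char) :
    (if PySem.Chars.isIn ['P','a','g','e'] line
      then (PySem.Chars.splitOn line ['P','a','g','e']).headD []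
      else line) = trunc line := by
  by_cases h : PySem.Chars.isIn ['P','a','g','e'] line = true
  · rw [if_pos h, splitOn_eq_splitRec, headD_splitRec]
  · rw [if_neg h]
    exact (trunc_of_not_infix line ((PySem.Chars.isIn_eq_false_iff _ _).mp
      (Bool.not_eq_true _ ▸ Bool.of_not_eq_true h))).symm

-- ===== VERDICT (by name: the statement is the Claim_ definition above) =====
theorem remove_after_page_spec : Claim_equal_remove_after_page := by
  intro text _
  unfold Spec_remove_after_page remove_after_page remove_after_page_alt
  dsimp only
  congr 1
  rw [PySem.List.foldl_append_singleton_eq_map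
    (f := fun line => if PySem.Chars.isIn ['P','a','g','e'] line then
        (PySem.Chars.splitOn line ['P','a','g','e']).headD []
      else line)]
  rw [List.nil_append]
  have hmap : (PySem.Chars.splitOn text.toList ['\n']).map
      (fun line => if PySem.Chars.isIn ['P','a','g','e'] line then
        (PySem.Chars.splitOn line ['P','a','g','e']).headD []
      else line) = (PySem.Chars.splitOn text.toList ['\n']).map trunc :=
    List.map_congr_left (fun line _ => line_eq_trunc line)
  rw [hmap, splitOn_eq_splitRec]
  rw [← altGo_join _ (nf_splitRec '\n' text.toList), join_splitRec]
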